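/- GENERATED by c/gen_decode.py: decode facts of the image, one per distinct instruction byte string. -/
import UserX.DecodeImage

#decode_all ProgX.Base.Dec
  "0fb64500"  -- movzx eax,BYTE PTR [rbp+0x0]
  "450fb62424"  -- movzx r12d,BYTE PTR [r12]
  "4883e6f0"  -- and rsi,0xfffffffffffffff0
  "4889dd"  -- mov rbp,rbx
  "488d4e40"  -- lea rcx,[rsi+0x40]
  "4989d4"  -- mov r12,rdx
  "4c89e5"  -- mov rbp,r12
  "660f2f0570dd0300"  -- comisd xmm0,QWORD PTR [rip+0x3dd70]
  "730f"  -- jae 100240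
  "7536"  -- jne 104266
  "7e69"  -- jle 1022a2
  "b800000001"  -- mov eax,0x1000000
  "e80afcffff"  -- call 102920
  "e8a4caffff"  -- call 100c00
  "e8f8feffff"  -- call 102380
  "ebef"  -- jmp 103539
  "f20f5805a3d70300"  -- addsd xmm0,QWORD PTR [rip+0x3d7a3]
  "f20f59c3"  -- mulsd xmm0,xmm3
  "f20f5e1d6fda0300"  -- divsd xmm3,QWORD PTR [rip+0x3da6f]
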